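-- pv_equiv track=rewrite | github.com/Vimaldemo/Invoice-and-hash | myproject/inv.py | _text_score
-- ===== SOURCE A (Python) =====
-- def _text_score(text):
--     if not text:
--         return 0
--     printable = sum(1 for ch in text if ch.isprintable())
--     alnum = sum(1 for ch in text if ch.isalnum())
--     if printable <= 0:
--         return 0
--     ratio = alnum / max(printable, 1)
--     return alnum + int(1000 * ratio)
-- ===== SOURCE B (Python) =====
-- def _text_score(text):
--     # Build a character-frequency table in one pass, then classify each
--     # DISTINCT character once and weight it by its multiplicity.
--     freq = {}
--     for ch in text:
--         freq[ch] = freq.get(ch, 0) + 1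
--     printable = 0
--     alnum = 0
--     for ch, n in freq.items():
--         if ch.isalnum():
--             alnum += n
--         if ch.isprintable():
--             printable += n
--     if printable == 0:
--         return 0
--     return alnum + 1000 * alnum // printable
-- ===== Notes on version B (the rewrite author's own statement) =====
-- stated objective: alternative
-- what changed: B builds a character-frequency dictionary once and classifies each distinct character a single time (weighting by multiplicity), with pure integer floor-division, instead of A's two whole-text comprehension scans with float division and max() guard.
import Mathlib
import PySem

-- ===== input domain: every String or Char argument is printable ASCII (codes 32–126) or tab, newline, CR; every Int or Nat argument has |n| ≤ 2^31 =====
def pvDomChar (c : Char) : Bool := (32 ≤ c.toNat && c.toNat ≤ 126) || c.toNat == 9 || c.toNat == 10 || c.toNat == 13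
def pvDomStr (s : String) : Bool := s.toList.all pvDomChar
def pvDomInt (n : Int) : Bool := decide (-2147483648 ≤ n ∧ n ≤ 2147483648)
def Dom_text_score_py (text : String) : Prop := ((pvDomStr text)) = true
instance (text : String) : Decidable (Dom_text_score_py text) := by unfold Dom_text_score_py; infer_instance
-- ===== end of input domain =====

-- B replaces A's two whole-text comprehension scans and float ratio by a
-- character-frequency dictionary built once, classifying each distinct character
-- a single time, with integer floor-division (objective: alternative).


-- Python's ch.isprintable(), ported by hand: exact on the domain (codes 32–126 are
-- printable; tab/newline/CR are not).
def pyIsPrintable (c : Char) : Bool := 32 ≤ c.toNat && c.toNat ≤ 126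

-- ===== PORT A =====
-- A's final line is `alnum + int(1000 * (alnum / max(printable, 1)))` with float
-- division; on this branch printable ≥ 1 and 0 ≤ alnum ≤ printable, where the float
-- result truncates to exactly ⌊1000*alnum/printable⌋, ported as integer floor-division.
def text_score_py (text : String) : Int :=
  if PySem.Str.len text = 0 then 0
  else
    let printable : Int :=
      text.toList.foldl (fun acc ch => if pyIsPrintable ch then acc + 1 else acc) 0
    let alnum : Int :=
      text.toList.foldl (fun acc ch => if PySem.Chars.isalnum ch then acc + 1 else acc) 0
    if printable ≤ 0 then 0
    else alnum + PySem.Int.floordiv (1000 * alnum) (max printable 1)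

-- ===== PORT B =====
def text_score_py_alt (text : String) : Int :=
  let freq : PySem.Dict Char Int :=
    text.toList.foldl (fun d ch => d.insert ch (d.getD ch 0 + 1)) PySem.Dict.empty
  let s : Int × Int :=
    freq.items.foldl
      (fun (s : Int × Int) kv =>
        let s1 := if PySem.Chars.isalnum kv.1 then (s.1 + kv.2, s.2) else s
        if pyIsPrintable kv.1 then (s1.1, s1.2 + kv.2) else s1)
      (0, 0)
  if s.2 = 0 then 0
  else s.1 + PySem.Int.floordiv (1000 * s.1) s.2

-- ===== PRECONDITION & SPEC =====
def Spec_text_score_py (text : String) (out : Int) : Prop := out = text_score_py_alt text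
instance (text : String) (out : Int) : Decidable (Spec_text_score_py text out) := by unfold Spec_text_score_py; infer_instance

-- ===== CLAIM (what is proved, stated in full; the proofs are below) =====
def Claim_equal_text_score_py : Prop := ∀ (text : String), Dom_text_score_py text → Spec_text_score_py text (text_score_py text)

-- ===== LEMMAS AND PROOFS =====

-- B's fold over (key, multiplicity) pairs splits into two weighted sums.
lemma pairfold_sum (ps : List (Char × Int)) (a p : Int) :
    ps.foldl
      (fun (s : Int × Int) kv =>
        let s1 := if PySem.Chars.isalnum kv.1 then (s.1 + kv.2, s.2) else s
        if pyIsPrintable kv.1 then (s1.1, s1.2 + kv.2) else s1)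
      (a, p)
    = (a + (ps.map (fun kv => if PySem.Chars.isalnum kv.1 then kv.2 else 0)).sum,
       p + (ps.map (fun kv => if pyIsPrintable kv.1 then kv.2 else 0)).sum) := by
  induction ps generalizing a p with
  | nil => simp
  | cons kv t ih =>
    have hstep :
        (let s1 := if PySem.Chars.isalnum kv.1 then ((a, p).1 + kv.2, (a, p).2) else (a, p)
         if pyIsPrintable kv.1 then (s1.1, s1.2 + kv.2) else s1)
        = ((if PySem.Chars.isalnum kv.1 then a + kv.2 else a),
           (if pyIsPrintable kv.1 then p + kv.2 else p)) := by
      by_cases ha : PySem.Chars.isalnum kv.1 = true <;>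
        by_cases hp : pyIsPrintable kv.1 = true <;> simp [ha, hp]
    rw [List.foldl_cons, hstep, ih]
    simp only [List.map_cons, List.sum_cons]
    simp only [Prod.mk.injEq]
    refine ⟨?_, ?_⟩ <;> split_ifs <;> ring

-- Summing a per-distinct-character weight (multiplicity when pred holds, else 0)
-- over the distinct characters of l recovers countP pred l.
lemma sum_toFinset_count (l : List Char) (pred : Char → Bool) :
    ∑ a ∈ l.toFinset, (if pred a then l.count a else 0) = l.countP pred := by
  classical
  have h1 : ∀ a, (if pred a then l.count a else 0) = (l.filter pred).count a := by
    intro a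
    by_cases hp : pred a = true
    · simp [hp, List.count_filter hp]
    · have : a ∉ l.filter pred := fun hm => by simp [List.mem_filter, hp] at hm
      simp [hp, List.count_eq_zero.mpr this]
  simp only [h1]
  have hsub : (l.filter pred).toFinset ⊆ l.toFinset := by
    intro a ha
    simp only [List.mem_toFinset] at *
    exact List.mem_of_mem_filter ha
  have hz : ∀ x ∈ l.toFinset, x ∉ (l.filter pred).toFinset → (l.filter pred).count x = 0 := by
    intro x _ hx
    exact List.count_eq_zero.mpr (fun hm => hx (List.mem_toFinset.mpr hm))
  rw [← Finset.sum_subset hsub hz, List.sum_toFinset_count_eq_length]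
  simp [List.countP_eq_length_filter]

-- The weighted sum over the counter's items is the plain countP over the list.
lemma sum_items_counter (l : List Char) (pred : Char → Bool) :
    (((PySem.Set.ofList l).map (fun k => (k, (l.count k : Int)))).map
        (fun kv : Char × Int => if pred kv.1 then kv.2 else 0)).sum
      = (l.countP pred : Int) := by
  classical
  rw [List.map_map]
  have hf : ((fun kv : Char × Int => if pred kv.1 then kv.2 else 0) ∘
      (fun k => (k, (l.count k : Int)))) =
      fun k => if pred k then (l.count k : Int) else 0 := by
    funext k; simp
  rw [hf]
  rw [← List.sum_toFinset _ (PySem.Set.nodup_ofList l)]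
  have hset : (PySem.Set.ofList l : List Char).toFinset = l.toFinset := by
    apply Finset.ext
    intro a
    simp [List.mem_toFinset, PySem.Set.mem_ofList]
  rw [hset]
  rw [show (fun k => if pred k then (l.count k : Int) else 0)
      = fun k => ((if pred k then l.count k else 0 : ℕ) : Int) by
    funext k; split_ifs <;> simp]
  rw [← Nat.cast_sum]
  rw [sum_toFinset_count l pred]

-- ===== VERDICT (by name: the statement is the Claim_ definition above) =====
theorem text_score_py_spec : Claim_equal_text_score_py := by
  intro text _hdom
  unfold Spec_text_score_py text_score_py text_score_py_alt
  simp only [PySem.Dict.foldl_insert_getD_add_one_eq_counter, PySem.Dict.items_counter,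
    pairfold_sum, sum_items_counter, PySem.List.foldl_count_if]
  set An : ℕ := text.toList.countP PySem.Chars.isalnum
  set Pn : ℕ := text.toList.countP pyIsPrintable
  by_cases hlen : PySem.Str.len text = 0
  · have hnil : text.toList = [] := by
      simpa [PySem.Str.len, PySem.Chars.len, List.length_eq_zero_iff] using hlen
    have : Pn = 0 := by simp [Pn, hnil]
    simp [this]
  · simp only [hlen, if_false, zero_add]
    by_cases hPz : Pn = 0
    · simp [hPz]
    · have h1 : ¬ ((Pn : Int) ≤ 0) := by
        have : 0 < Pn := Nat.pos_of_ne_zero hPz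
        exact not_le.mpr (by exact_mod_cast this)
      have h2 : ¬ ((Pn : Int) = 0) := by exact_mod_cast hPz
      have hmax : max (Pn : Int) 1 = (Pn : Int) := by
        have : 0 < Pn := Nat.pos_of_ne_zero hPz
        have : (1 : Int) ≤ (Pn : Int) := by exact_mod_cast this
        omega
      simp [hmax]
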